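-- pv_equiv track=rewrite | github.com/rodolfodiasr/firemanager | backend/app/agent/context_collector.py | get_next_question
-- ===== SOURCE A (Python) =====
-- _FIELD_QUESTIONS: dict[str, str] = {
--     "name": "Qual o nome para esta regra?",
--     "src_address": "Qual o endereço de origem? (IP, range CIDR ou nome do objeto)",
--     "dst_address": "Qual o endereço de destino? (IP, range CIDR ou nome do objeto)",
--     "service": "Qual serviço/porta? (ex: HTTPS, HTTP, TCP/8080, UDP/53)",
--     "action": "Qual a ação? (accept/deny/drop)",
--     "comment": "Deseja adicionar um comentário/justificativa para esta regra? (opcional)",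
--     "rule_id": "Qual o ID ou nome da regra que deseja modificar?",
--     "members": "Quais endereços/objetos fazem parte do grupo? (separe por vírgula)",
-- }
--
-- def get_next_question(missing_fields: list[str]) -> str | None:
--     """Return the next question to ask based on missing required fields."""
--     required_first = ["name", "src_address", "dst_address", "service", "action", "rule_id", "members"]
--     for field in required_first:
--         if field in missing_fields:
--             return _FIELD_QUESTIONS.get(field)
--     # Handle any remaining fields
--     for field in missing_fields:
--         if field in _FIELD_QUESTIONS:
--             return _FIELD_QUESTIONS[field]
--     return None
-- ===== SOURCE B (Python) =====
-- _FIELD_QUESTIONS: dict[str, str] = {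
--     "name": "Qual o nome para esta regra?",
--     "src_address": "Qual o endereço de origem? (IP, range CIDR ou nome do objeto)",
--     "dst_address": "Qual o endereço de destino? (IP, range CIDR ou nome do objeto)",
--     "service": "Qual serviço/porta? (ex: HTTPS, HTTP, TCP/8080, UDP/53)",
--     "action": "Qual a ação? (accept/deny/drop)",
--     "comment": "Deseja adicionar um comentário/justificativa para esta regra? (opcional)",
--     "rule_id": "Qual o ID ou nome da regra que deseja modificar?",
--     "members": "Quais endereços/objetos fazem parte do grupo? (separe por vírgula)",
-- }
--
-- _PRIORITY = ["name", "src_address", "dst_address", "service", "action", "rule_id", "members", "comment"]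
--
-- def get_next_question(missing_fields: list[str]) -> str | None:
--     """Return the next question to ask based on missing required fields."""
--     return next((_FIELD_QUESTIONS.get(f) for f in _PRIORITY if f in missing_fields), None)
-- ===== Notes on version B (the rewrite author's own statement) =====
-- stated objective: simpler
-- what changed: Replaces A's two loops (priority scan, then a fallback scan over missing_fields) with a single pass over one ordered priority list ending in 'comment' -- correct because the fallback loop can only ever match 'comment'.
import Mathlib
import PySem

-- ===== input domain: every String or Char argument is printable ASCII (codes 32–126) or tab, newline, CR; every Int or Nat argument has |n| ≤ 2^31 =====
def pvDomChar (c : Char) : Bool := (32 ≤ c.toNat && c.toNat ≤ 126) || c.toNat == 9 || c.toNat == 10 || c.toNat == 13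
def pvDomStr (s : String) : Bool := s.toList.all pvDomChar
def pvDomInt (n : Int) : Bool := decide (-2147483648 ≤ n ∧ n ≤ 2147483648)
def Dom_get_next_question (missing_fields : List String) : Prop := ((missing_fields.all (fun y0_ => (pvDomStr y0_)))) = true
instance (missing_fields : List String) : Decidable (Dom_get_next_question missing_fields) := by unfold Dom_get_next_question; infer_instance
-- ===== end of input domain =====

-- ===== PORT A =====
-- B changes: one pass over a single priority list replaces A's two loops (simpler); same return values.
def fieldQuestions : PySem.Dict String String := PySem.Dict.ofList [
  ("name", "Qual o nome para esta regra?"),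
  ("src_address", "Qual o endereço de origem? (IP, range CIDR ou nome do objeto)"),
  ("dst_address", "Qual o endereço de destino? (IP, range CIDR ou nome do objeto)"),
  ("service", "Qual serviço/porta? (ex: HTTPS, HTTP, TCP/8080, UDP/53)"),
  ("action", "Qual a ação? (accept/deny/drop)"),
  ("comment", "Deseja adicionar um comentário/justificativa para esta regra? (opcional)"),
  ("rule_id", "Qual o ID ou nome da regra que deseja modificar?"),
  ("members", "Quais endereços/objetos fazem parte do grupo? (separe por vírgula)")]

-- second loop of A: 'for field in missing_fields: if field in _FIELD_QUESTIONS: return _FIELD_QUESTIONS[field]'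
def aLoop2 : List String → Option String
  | [] => none
  | f :: rest =>
    match PySem.Dict.get? fieldQuestions f with
    | some q => some q
    | none => aLoop2 rest

-- first loop of A over required_first; falls through to the second loop
def aLoop1 (missing_fields : List String) : List String → Option String
  | [] => aLoop2 missing_fields
  | f :: rest =>
    if missing_fields.contains f then PySem.Dict.get? fieldQuestions f
    else aLoop1 missing_fields rest

def get_next_question (missing_fields : List String) : Option String :=
  aLoop1 missing_fields ["name", "src_address", "dst_address", "service", "action", "rule_id", "members"]

-- ===== PORT B =====
-- single pass over the one ordered priority list (next(...) with default None)
def bLoop (missing_fields : List String) : List String → Option String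
  | [] => none
  | f :: rest =>
    if missing_fields.contains f then PySem.Dict.get? fieldQuestions f
    else bLoop missing_fields rest

def get_next_question_alt (missing_fields : List String) : Option String :=
  bLoop missing_fields ["name", "src_address", "dst_address", "service", "action", "rule_id", "members", "comment"]

-- ===== PRECONDITION & SPEC =====
def Spec_get_next_question (missing_fields : List String) (out : Option String) : Prop := out = get_next_question_alt missing_fields
instance (missing_fields : List String) (out : Option String) : Decidable (Spec_get_next_question missing_fields out) := by unfold Spec_get_next_question; infer_instance

-- ===== CLAIM (what is proved, stated in full; the proofs are below) =====
def Claim_equal_get_next_question : Prop := ∀ (missing_fields : List String), Dom_get_next_question missing_fields → Spec_get_next_question missing_fields (get_next_question missing_fields)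

-- ===== LEMMAS AND PROOFS =====
-- closed form of the dict lookup on an arbitrary key
theorem get?_fieldQuestions (f : String) : PySem.Dict.get? fieldQuestions f =
    if "name" = f then some "Qual o nome para esta regra?"
    else if "src_address" = f then some "Qual o endereço de origem? (IP, range CIDR ou nome do objeto)"
    else if "dst_address" = f then some "Qual o endereço de destino? (IP, range CIDR ou nome do objeto)"
    else if "service" = f then some "Qual serviço/porta? (ex: HTTPS, HTTP, TCP/8080, UDP/53)"
    else if "action" = f then some "Qual a ação? (accept/deny/drop)"
    else if "comment" = f then some "Deseja adicionar um comentário/justificativa para esta regra? (opcional)"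
    else if "rule_id" = f then some "Qual o ID ou nome da regra que deseja modificar?"
    else if "members" = f then some "Quais endereços/objetos fazem parte do grupo? (separe por vírgula)"
    else none := by
  have h : fieldQuestions = PySem.Dict.mk [
    ("name", "Qual o nome para esta regra?"),
    ("src_address", "Qual o endereço de origem? (IP, range CIDR ou nome do objeto)"),
    ("dst_address", "Qual o endereço de destino? (IP, range CIDR ou nome do objeto)"),
    ("service", "Qual serviço/porta? (ex: HTTPS, HTTP, TCP/8080, UDP/53)"),
    ("action", "Qual a ação? (accept/deny/drop)"),
    ("comment", "Deseja adicionar um comentário/justificativa para esta regra? (opcional)"),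
    ("rule_id", "Qual o ID ou nome da regra que deseja modificar?"),
    ("members", "Quais endereços/objetos fazem parte do grupo? (separe por vírgula)")] := by decide
  simp only [h, PySem.Dict.get?, List.find?]
  by_cases c1 : ("name" == f) = true <;>
  by_cases c2 : ("src_address" == f) = true <;>
  by_cases c3 : ("dst_address" == f) = true <;>
  by_cases c4 : ("service" == f) = true <;>
  by_cases c5 : ("action" == f) = true <;>
  by_cases c6 : ("comment" == f) = true <;>
  by_cases c7 : ("rule_id" == f) = true <;>
  by_cases c8 : ("members" == f) = true <;>
    simp only [Bool.not_eq_true] at c1 c2 c3 c4 c5 c6 c7 c8 <;>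
    simp [c1, c2, c3, c4, c5, c6, c7, c8] <;>
    simp_all [beq_iff_eq, beq_eq_false_iff_ne]

-- A's fallback loop can only ever fire on "comment" once the seven required fields are absent
theorem aLoop2_eq (mf : List String)
    (h1 : "name" ∉ mf) (h2 : "src_address" ∉ mf) (h3 : "dst_address" ∉ mf)
    (h4 : "service" ∉ mf) (h5 : "action" ∉ mf) (h6 : "rule_id" ∉ mf) (h7 : "members" ∉ mf) :
    ∀ l : List String, (∀ f ∈ l, f ∈ mf) →
      aLoop2 l = if l.contains "comment" then
          some "Deseja adicionar um comentário/justificativa para esta regra? (opcional)" else none := by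
  intro l
  induction l with
  | nil => intro _; simp [aLoop2]
  | cons f rest ih =>
    intro hsub
    have hf : f ∈ mf := hsub f (List.mem_cons_self)
    have hrest := ih (fun g hg => hsub g (List.mem_cons_of_mem f hg))
    by_cases hc : f = "comment"
    · subst hc
      have hq : PySem.Dict.get? fieldQuestions "comment" =
          some "Deseja adicionar um comentário/justificativa para esta regra? (opcional)" := by decide
      simp [aLoop2, hq]
    · have hn : PySem.Dict.get? fieldQuestions f = none := by
        rw [get?_fieldQuestions f]
        split_ifs with d1 d2 d3 d4 d5 d6 d7 d8
        · exact absurd (d1 ▸ hf) h1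
        · exact absurd (d2 ▸ hf) h2
        · exact absurd (d3 ▸ hf) h3
        · exact absurd (d4 ▸ hf) h4
        · exact absurd (d5 ▸ hf) h5
        · exact absurd d6.symm hc
        · exact absurd (d7 ▸ hf) h6
        · exact absurd (d8 ▸ hf) h7
        · rfl
      have hc' : ¬ ("comment" = f) := fun e => hc e.symm
      simp [aLoop2, hn, hrest, hc']

-- ===== VERDICT (by name: the statement is the Claim_ definition above) =====
theorem get_next_question_spec : Claim_equal_get_next_question := by
  intro mf _
  unfold Spec_get_next_question get_next_question get_next_question_alt
  simp only [aLoop1, bLoop]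
  by_cases n1 : "name" ∈ mf
  · simp [n1]
  by_cases n2 : "src_address" ∈ mf
  · simp [n1, n2]
  by_cases n3 : "dst_address" ∈ mf
  · simp [n1, n2, n3]
  by_cases n4 : "service" ∈ mf
  · simp [n1, n2, n3, n4]
  by_cases n5 : "action" ∈ mf
  · simp [n1, n2, n3, n4, n5]
  by_cases n6 : "rule_id" ∈ mf
  · simp [n1, n2, n3, n4, n5, n6]
  by_cases n7 : "members" ∈ mf
  · simp [n1, n2, n3, n4, n5, n6, n7]
  · have hq : PySem.Dict.get? fieldQuestions "comment" =
        some "Deseja adicionar um comentário/justificativa para esta regra? (opcional)" := by decide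
    simp [n1, n2, n3, n4, n5, n6, n7, hq,
      aLoop2_eq mf n1 n2 n3 n4 n5 n6 n7 mf (fun _ h => h)]
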